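-- pv_equiv track=rewrite | github.com/macdleeuwen/democratic_failures_library | election_systems/copeland.py | copeland
-- ===== SOURCE A (Python) =====
-- def copeland(prefs):
--     candidate_scores = {}
--
--     for voter_pref in prefs:
--         for i, candidate in enumerate(voter_pref):
--             if candidate not in candidate_scores:
--                 candidate_scores[candidate] = 0
--
--             for other_candidate in voter_pref[i + 1:]:
--                 candidate_scores[candidate] += compare_candidates(candidate, other_candidate, prefs)
--
--     sorted_result = sorted(candidate_scores.items(), key=lambda x: x[1], reverse=True)
--     results_list = []
--     for each in sorted_result:
--         results_list.append(each[0])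
--
--     return results_list
--
-- def compare_candidates(candidate1, candidate2, prefs):
--     candidate1_wins = 0
--     candidate2_wins = 0
--
--     for voter_pref in prefs:
--         if candidate1 in voter_pref and candidate2 in voter_pref:
--             if voter_pref.index(candidate1) < voter_pref.index(candidate2):
--                 candidate1_wins += 1
--             else:
--                 candidate2_wins += 1
--
--     if candidate1_wins > candidate2_wins:
--         return 1
--     elif candidate2_wins > candidate1_wins:
--         return -1
--     else:
--         return 0
-- ===== SOURCE B (Python) =====
-- def copeland(prefs):
--     # Faster: one pass over the ballots precomputes the pairwise matrices
--     #   both[(a, b)] = number of ballots containing both a and b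
--     #   wins[(a, b)] = number of ballots where a's first occurrence precedes b's
--     # so each pairwise comparison becomes an O(1) lookup instead of a rescan of all ballots.
--     both, wins = build_matrices(prefs)
--
--     scores = {}
--     for voter_pref in prefs:
--         for i, c in enumerate(voter_pref):
--             if c not in scores:
--                 scores[c] = 0
--             for other in voter_pref[i + 1:]:
--                 scores[c] += sign(both, wins, c, other)
--
--     return [c for c, _ in sorted(scores.items(), key=lambda x: x[1], reverse=True)]
--
-- def build_matrices(prefs):
--     both = {}
--     wins = {}
--     for voter_pref in prefs:
--         first = {}
--         for i, c in enumerate(voter_pref):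
--             if c not in first:
--                 first[c] = i
--         for a, ia in first.items():
--             for b, ib in first.items():
--                 both[(a, b)] = both.get((a, b), 0) + 1
--                 if ia < ib:
--                     wins[(a, b)] = wins.get((a, b), 0) + 1
--     return both, wins
--
-- def sign(both, wins, a, b):
--     w = wins.get((a, b), 0)
--     l = both.get((a, b), 0) - w
--     if w > l:
--         return 1
--     elif l > w:
--         return -1
--     else:
--         return 0
-- ===== Notes on version B (the rewrite author's own statement) =====
-- stated objective: faster
-- what changed: B precomputes in one pass over the ballots a pairwise both/wins count matrix (via per-ballot first-index dicts) and derives each pairwise comparison from it in O(1), instead of re-scanning all ballots with compare_candidates for every (ballot, position, later position) triple.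
import Mathlib
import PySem

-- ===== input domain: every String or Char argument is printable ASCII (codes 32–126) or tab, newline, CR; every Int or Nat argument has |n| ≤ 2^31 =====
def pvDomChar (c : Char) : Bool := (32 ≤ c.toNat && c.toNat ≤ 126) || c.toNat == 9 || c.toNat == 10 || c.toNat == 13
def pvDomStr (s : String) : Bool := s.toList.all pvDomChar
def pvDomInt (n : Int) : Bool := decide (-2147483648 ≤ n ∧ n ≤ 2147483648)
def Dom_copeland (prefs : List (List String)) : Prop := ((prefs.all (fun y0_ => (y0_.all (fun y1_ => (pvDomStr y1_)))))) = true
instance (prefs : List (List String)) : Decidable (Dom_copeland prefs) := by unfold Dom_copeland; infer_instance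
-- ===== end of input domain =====

-- B precomputes pairwise both/wins count matrices in one pass over the ballots and derives each
-- pairwise comparison from them by lookup, instead of rescanning all ballots per pair occurrence.


-- ===== PORT A =====
-- compare_candidates: `.index` is guarded by the membership test, so it never raises;
-- the `.getD 0` default of index? is unreachable there.
def compareCandidates (candidate1 candidate2 : String) (prefs : List (List String)) : Int :=
  let wl : Int × Int := prefs.foldl (fun (p : Int × Int) voterPref =>
    if candidate1 ∈ voterPref ∧ candidate2 ∈ voterPref then
      if ((PySem.List.index? voterPref candidate1).getD 0) < ((PySem.List.index? voterPref candidate2).getD 0) then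
        (p.1 + 1, p.2)
      else
        (p.1, p.2 + 1)
    else p) (0, 0)
  if wl.1 > wl.2 then 1 else if wl.2 > wl.1 then -1 else 0

-- `candidate_scores[candidate] += …` is `modify` with default 0: the key was just ensured present.
def copeland (prefs : List (List String)) : List String :=
  let candidateScores : PySem.Dict String Int := prefs.foldl (fun d voterPref =>
    (PySem.List.enumerate voterPref).foldl (fun d ic =>
      let d := if d.contains ic.2 then d else d.insert ic.2 0
      (PySem.List.slice voterPref (some (ic.1 + 1)) none).foldl (fun d other =>
        d.modify ic.2 0 (· + compareCandidates ic.2 other prefs)) d) d) PySem.Dict.empty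
  let sortedResult := PySem.List.sorted candidateScores.items (fun x => x.2) true
  sortedResult.foldl (fun acc each => acc ++ [each.1]) []

-- ===== PORT B =====
def buildMatrices (prefs : List (List String)) :
    PySem.Dict (String × String) Int × PySem.Dict (String × String) Int :=
  prefs.foldl (fun bw voterPref =>
    let first : PySem.Dict String Int := (PySem.List.enumerate voterPref).foldl (fun f ic =>
      if f.contains ic.2 then f else f.insert ic.2 ic.1) PySem.Dict.empty
    first.items.foldl (fun bw a =>
      first.items.foldl (fun bw b =>
        (bw.1.insert (a.1, b.1) (bw.1.getD (a.1, b.1) 0 + 1),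
         if a.2 < b.2 then bw.2.insert (a.1, b.1) (bw.2.getD (a.1, b.1) 0 + 1) else bw.2)) bw) bw)
    (PySem.Dict.empty, PySem.Dict.empty)

def sign (both wins : PySem.Dict (String × String) Int) (a b : String) : Int :=
  let w := wins.getD (a, b) 0
  let l := both.getD (a, b) 0 - w
  if w > l then 1 else if l > w then -1 else 0

def copeland_alt (prefs : List (List String)) : List String :=
  let bw := buildMatrices prefs
  let scores : PySem.Dict String Int := prefs.foldl (fun d voterPref =>
    (PySem.List.enumerate voterPref).foldl (fun d ic =>
      let d := if d.contains ic.2 then d else d.insert ic.2 0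
      (PySem.List.slice voterPref (some (ic.1 + 1)) none).foldl (fun d other =>
        d.modify ic.2 0 (· + sign bw.1 bw.2 ic.2 other)) d) d) PySem.Dict.empty
  (PySem.List.sorted scores.items (fun x => x.2) true).map (·.1)

-- ===== PRECONDITION & SPEC =====
def Spec_copeland (prefs : List (List String)) (out : List String) : Prop := out = copeland_alt prefs
instance (prefs : List (List String)) (out : List String) : Decidable (Spec_copeland prefs out) := by unfold Spec_copeland; infer_instance

-- ===== CLAIM (what is proved, stated in full; the proofs are below) =====
def Claim_equal_copeland : Prop := ∀ (prefs : List (List String)), Dom_copeland prefs → Spec_copeland prefs (copeland prefs)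

-- ===== LEMMAS AND PROOFS =====

-- predicates on a single ballot (proof-side only)
def winP (a b : String) (v : List String) : Bool :=
  decide (a ∈ v ∧ b ∈ v) &&
    decide (((PySem.List.index? v a).getD 0) < ((PySem.List.index? v b).getD 0))

def loseP (a b : String) (v : List String) : Bool :=
  decide (a ∈ v ∧ b ∈ v) &&
    !decide (((PySem.List.index? v a).getD 0) < ((PySem.List.index? v b).getD 0))

-- the first-index dict of one ballot
def firstD (v : List String) (s : Int) (f : PySem.Dict String Int) : PySem.Dict String Int :=
  (PySem.List.enumerate v s).foldl (fun f ic => if f.contains ic.2 then f else f.insert ic.2 ic.1) f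

lemma firstD_get? (v : List String) (s : Int) (f : PySem.Dict String Int) (c : String) :
    (firstD v s f).get? c =
      (f.get? c).or ((PySem.List.index? v c).map (fun k => s + (k : Int))) := by
  induction v generalizing s f with
  | nil => simp [firstD, PySem.List.enumerate_nil, PySem.List.index?]
  | cons x t ih =>
    rw [firstD, PySem.List.enumerate_cons, List.foldl_cons]
    by_cases hx : x = c
    · subst hx
      rw [show PySem.List.index? (x :: t) x = some 0 from PySem.List.index?_cons_self x t]
      by_cases hc : f.contains x = true
      · simp only [hc, if_true]
        rw [← firstD, ih]
        have h0 : (f.get? x).isSome := by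
          rw [← PySem.Dict.contains_eq_isSome_get?]; exact hc
        rcases Option.isSome_iff_exists.mp h0 with ⟨w, hw⟩
        simp [hw]
      · simp only [hc]
        rw [← firstD, ih]
        have h1 : f.get? x = none := (PySem.Dict.get?_eq_none_iff_contains f x).mpr (by simpa using hc)
        simp [h1, PySem.Dict.get?_insert_self]
    · rw [PySem.List.index?_cons_of_ne _ hx]
      have hf' : (if f.contains x = true then f else f.insert x s).get? c = f.get? c := by
        split
        · rfl
        · exact PySem.Dict.get?_insert_of_ne f s (Ne.symm hx)
      rw [← firstD, ih, hf']
      cases hio : PySem.List.index? t c with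
      | none => simp
      | some k =>
        simp
        rw [show s + 1 + (k : ℤ) = s + ((k : ℤ) + 1) by ring]

lemma firstD_nodup (v : List String) (s : Int) (f : PySem.Dict String Int)
    (h : f.keys.Nodup) : (firstD v s f).keys.Nodup := by
  induction v generalizing s f with
  | nil => simpa [firstD, PySem.List.enumerate_nil] using h
  | cons x t ih =>
    rw [firstD, PySem.List.enumerate_cons, List.foldl_cons, ← firstD]
    apply ih
    split
    · exact h
    · exact PySem.Dict.nodup_keys_insert f x s h

lemma firstD_mem_keys (v : List String) (c : String) :
    c ∈ (firstD v 0 PySem.Dict.empty).keys ↔ c ∈ v := by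
  rw [← PySem.Dict.contains_iff_mem_keys, PySem.Dict.contains_eq_isSome_get?, firstD_get?,
    ← PySem.List.index?_isSome_iff]
  cases h : PySem.List.index? v c <;> simp_all

lemma firstD_getD (v : List String) (c : String) (hc : c ∈ v) :
    (firstD v 0 PySem.Dict.empty).getD c 0 = (((PySem.List.index? v c).getD 0 : Nat) : Int) := by
  rcases Option.isSome_iff_exists.mp ((PySem.List.index?_isSome_iff v c).mpr hc) with ⟨k, hk⟩
  rw [PySem.Dict.getD_eq_get?_getD, firstD_get?, hk]
  simp

-- counting folds over a list incrementing a keyed counter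
lemma getD_incr_fold {α : Type} (l : List α) (key : α → String × String) (P : α → Prop)
    [DecidablePred P] (d : PySem.Dict (String × String) Int) (k : String × String) :
    (l.foldl (fun d x => if P x then d.insert (key x) (d.getD (key x) 0 + 1) else d) d).getD k 0
      = d.getD k 0 + ((l.countP (fun x => decide (P x) && decide (key x = k))) : Int) := by
  induction l generalizing d with
  | nil => simp
  | cons x t ih =>
    simp only [List.foldl_cons, List.countP_cons, ih]
    by_cases hg : P x
    · simp only [hg, if_true, decide_true, Bool.true_and]
      by_cases hk : key x = k
      · simp [hk, PySem.Dict.getD_insert_self]; ring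
      · rw [PySem.Dict.getD_insert_of_ne]
        · simp [hk]
        · exact Ne.symm hk
    · simp [hg]

lemma getD_incr_fold' {α : Type} (l : List α) (key : α → String × String)
    (d : PySem.Dict (String × String) Int) (k : String × String) :
    (l.foldl (fun d x => d.insert (key x) (d.getD (key x) 0 + 1)) d).getD k 0
      = d.getD k 0 + ((l.countP (fun x => decide (key x = k))) : Int) := by
  induction l generalizing d with
  | nil => simp
  | cons x t ih =>
    simp only [List.foldl_cons, List.countP_cons, ih]
    by_cases hk : key x = k
    · simp [hk, PySem.Dict.getD_insert_self]; ring
    · rw [PySem.Dict.getD_insert_of_ne]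
      · simp [hk]
      · exact Ne.symm hk

-- a fold whose step changes the entry at k by a state-independent delta
lemma fold_delta {α : Type} (l : List α)
    (F : PySem.Dict (String × String) Int → α → PySem.Dict (String × String) Int)
    (δ : α → Int) (k : String × String)
    (h : ∀ d a, (F d a).getD k 0 = d.getD k 0 + δ a)
    (d : PySem.Dict (String × String) Int) :
    (l.foldl F d).getD k 0 = d.getD k 0 + (l.map δ).sum := by
  induction l generalizing d with
  | nil => simp
  | cons x t ih => simp only [List.foldl_cons, List.map_cons, List.sum_cons, ih, h]; ring

lemma sum_map_ite_unique {α : Type} [DecidableEq α] (l : List α) (a : α) (E : α → Int)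
    (h : l.Nodup) :
    (l.map (fun c => if c = a then E c else 0)).sum = if a ∈ l then E a else 0 := by
  induction l with
  | nil => simp
  | cons x t ih =>
    simp only [List.map_cons, List.sum_cons, List.mem_cons]
    rcases List.nodup_cons.mp h with ⟨hx, ht⟩
    by_cases hxa : x = a
    · subst hxa
      simp [hx, ih ht]
    · simp [hxa, Ne.symm hxa, ih ht]

lemma countP_nodup_eq {α : Type} [DecidableEq α] (l : List α) (h : l.Nodup) (b : α) :
    l.countP (fun c => decide (c = b)) = if b ∈ l then 1 else 0 := by
  induction l with
  | nil => simp
  | cons x t ih =>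
    rcases List.nodup_cons.mp h with ⟨hx, ht⟩
    simp only [List.countP_cons, ih ht, List.mem_cons]
    by_cases hxb : x = b
    · subst hxb
      simp [hx]
    · have : ¬ b = x := fun h => hxb h.symm
      simp [hxb, this]

lemma countP_nodup_unique {α : Type} [DecidableEq α] (l : List α) (h : l.Nodup)
    (q : α → Bool) (b : α) :
    l.countP (fun c => q c && decide (c = b)) = if b ∈ l ∧ q b = true then 1 else 0 := by
  induction l with
  | nil => simp
  | cons x t ih =>
    rcases List.nodup_cons.mp h with ⟨hx, ht⟩
    simp only [List.countP_cons, ih ht, List.mem_cons]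
    by_cases hxb : x = b
    · subst hxb
      by_cases hq : q x = true
      · simp [hq, hx]
      · simp [hq, hx]
    · have : ¬ b = x := fun h => hxb h.symm
      simp [hxb, this]

lemma countP_both_split (a b : String) (prefs : List (List String)) :
    prefs.countP (fun v => decide (a ∈ v ∧ b ∈ v))
      = prefs.countP (winP a b) + prefs.countP (loseP a b) := by
  induction prefs with
  | nil => simp
  | cons v t ih =>
    simp only [List.countP_cons, winP, loseP, ih]
    by_cases h1 : (a ∈ v ∧ b ∈ v)
    · by_cases h2 : ((List.idxOf? a v).getD 0) < ((List.idxOf? b v).getD 0) <;>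
        simp [h1, h2] <;> omega
    · simp [h1]

lemma compare_fold (a b : String) (prefs : List (List String)) (p : Int × Int) :
    prefs.foldl (fun (p : Int × Int) voterPref =>
      if a ∈ voterPref ∧ b ∈ voterPref then
        if ((PySem.List.index? voterPref a).getD 0) < ((PySem.List.index? voterPref b).getD 0) then
          (p.1 + 1, p.2)
        else
          (p.1, p.2 + 1)
      else p) p
    = (p.1 + (prefs.countP (winP a b) : Int), p.2 + (prefs.countP (loseP a b) : Int)) := by
  induction prefs generalizing p with
  | nil => simp
  | cons v t ih =>
    simp only [List.foldl_cons, List.countP_cons, ih, winP, loseP]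
    by_cases h1 : (a ∈ v ∧ b ∈ v)
    · by_cases h2 : ((List.idxOf? a v).getD 0) < ((List.idxOf? b v).getD 0) <;>
        · simp [h1, h2]; ring
    · simp [h1]

-- the double loop over one ballot's first-index items
def pairLoop (its : List (String × Int))
    (bw : PySem.Dict (String × String) Int × PySem.Dict (String × String) Int) :
    PySem.Dict (String × String) Int × PySem.Dict (String × String) Int :=
  its.foldl (fun bw a =>
    its.foldl (fun bw b =>
      (bw.1.insert (a.1, b.1) (bw.1.getD (a.1, b.1) 0 + 1),
       if a.2 < b.2 then bw.2.insert (a.1, b.1) (bw.2.getD (a.1, b.1) 0 + 1) else bw.2)) bw) bw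

lemma ballot_getD (v : List String) (a0 b0 : String)
    (d1 d2 : PySem.Dict (String × String) Int) :
    (pairLoop (firstD v 0 PySem.Dict.empty).items (d1, d2)).1.getD (a0, b0) 0
        = d1.getD (a0, b0) 0 + (if a0 ∈ v ∧ b0 ∈ v then 1 else 0)
    ∧ (pairLoop (firstD v 0 PySem.Dict.empty).items (d1, d2)).2.getD (a0, b0) 0
        = d2.getD (a0, b0) 0 + (if winP a0 b0 v = true then 1 else 0) := by
  have nd : (firstD v 0 PySem.Dict.empty).keys.Nodup := firstD_nodup v 0 _ (by simp)
  set F := firstD v 0 PySem.Dict.empty with hF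
  have hitems : F.items = F.keys.map (fun c => (c, F.getD c 0)) :=
    PySem.Dict.items_eq_map_keys F nd 0
  have hmem : ∀ c, c ∈ F.keys ↔ c ∈ v := fun c => firstD_mem_keys v c
  have hinner : ∀ (bw : PySem.Dict (String × String) Int × PySem.Dict (String × String) Int)
      (a : String × Int),
      F.items.foldl (fun bw b =>
        (bw.1.insert (a.1, b.1) (bw.1.getD (a.1, b.1) 0 + 1),
         if a.2 < b.2 then bw.2.insert (a.1, b.1) (bw.2.getD (a.1, b.1) 0 + 1) else bw.2)) bw
      = (F.items.foldl (fun d b => d.insert (a.1, b.1) (d.getD (a.1, b.1) 0 + 1)) bw.1,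
         F.items.foldl (fun d b =>
           if a.2 < b.2 then d.insert (a.1, b.1) (d.getD (a.1, b.1) 0 + 1) else d) bw.2) := by
    intro bw a
    cases bw with
    | mk x y =>
      exact PySem.List.foldl_prod_mk
        (fun d b => d.insert (a.1, b.1) (d.getD (a.1, b.1) 0 + 1))
        (fun d b => if a.2 < b.2 then d.insert (a.1, b.1) (d.getD (a.1, b.1) 0 + 1) else d)
        F.items x y
  have houter : pairLoop F.items (d1, d2)
      = (F.items.foldl (fun d a =>
           F.items.foldl (fun d b => d.insert (a.1, b.1) (d.getD (a.1, b.1) 0 + 1)) d) d1,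
         F.items.foldl (fun d a =>
           F.items.foldl (fun d b =>
             if a.2 < b.2 then d.insert (a.1, b.1) (d.getD (a.1, b.1) 0 + 1) else d) d) d2) := by
    unfold pairLoop
    rw [PySem.List.foldl_congr_mem _ _ _ _ (fun acc x _ => hinner acc x)]
    exact PySem.List.foldl_prod_mk
      (fun d a => F.items.foldl (fun d b => d.insert (a.1, b.1) (d.getD (a.1, b.1) 0 + 1)) d)
      (fun d a => F.items.foldl
        (fun d b => if a.2 < b.2 then d.insert (a.1, b.1) (d.getD (a.1, b.1) 0 + 1) else d) d)
      F.items d1 d2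
  rw [houter]
  constructor
  · rw [fold_delta F.items _
      (fun a => ((F.items.countP (fun x => decide ((a.1, x.1) = (a0, b0)))) : Int)) (a0, b0)
      (fun d a => getD_incr_fold' F.items (fun x => (a.1, x.1)) d (a0, b0)) d1]
    congr 1
    have hE : ∀ a : String × Int,
        ((F.items.countP (fun x => decide ((a.1, x.1) = (a0, b0)))) : Int)
          = if a.1 = a0 then (if b0 ∈ v then 1 else 0) else 0 := by
      intro a
      by_cases hc : a.1 = a0
      · rw [List.countP_congr (p := fun x => decide ((a.1, x.1) = (a0, b0)))
          (q := fun x : String × Int => decide (x.1 = b0))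
          (fun x _ => by simp [Prod.ext_iff, hc])]
        rw [hitems, List.countP_map]
        have : ((fun x : String × Int => decide (x.1 = b0)) ∘ fun c => (c, F.getD c 0))
            = fun c => decide (c = b0) := rfl
        rw [this, countP_nodup_eq F.keys nd b0]
        simp [hc, hmem]
      · rw [List.countP_eq_zero.mpr (fun x hx => by simp [Prod.ext_iff, hc])]
        simp [hc]
    rw [show (fun a : String × Int =>
        ((F.items.countP (fun x => decide ((a.1, x.1) = (a0, b0)))) : Int))
      = (fun a : String × Int => if a.1 = a0 then (if b0 ∈ v then (1 : Int) else 0) else 0)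
      from funext fun a => hE a]
    rw [hitems, List.map_map]
    have : ((fun a : String × Int => if a.1 = a0 then (if b0 ∈ v then (1 : Int) else 0) else 0)
        ∘ fun c => (c, F.getD c 0))
        = fun c => if c = a0 then (if b0 ∈ v then (1 : Int) else 0) else 0 := rfl
    rw [this, sum_map_ite_unique F.keys a0 _ nd]
    by_cases ha : a0 ∈ v <;> by_cases hb : b0 ∈ v <;> simp [ha, hb, hmem]
  · rw [fold_delta F.items _
      (fun a => ((F.items.countP (fun x => decide (a.2 < x.2) && decide ((a.1, x.1) = (a0, b0)))) : Int))
      (a0, b0)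
      (fun d a => getD_incr_fold F.items (fun x => (a.1, x.1)) (fun x => a.2 < x.2) d (a0, b0)) d2]
    congr 1
    have hE : ∀ a : String × Int,
        ((F.items.countP (fun x => decide (a.2 < x.2) && decide ((a.1, x.1) = (a0, b0)))) : Int)
          = if a.1 = a0 then (if b0 ∈ v ∧ a.2 < F.getD b0 0 then 1 else 0) else 0 := by
      intro a
      by_cases hc : a.1 = a0
      · rw [List.countP_congr (p := fun x => decide (a.2 < x.2) && decide ((a.1, x.1) = (a0, b0)))
          (q := fun x : String × Int => decide (a.2 < x.2) && decide (x.1 = b0))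
          (fun x _ => by simp [Prod.ext_iff, hc])]
        rw [hitems, List.countP_map]
        have : ((fun x : String × Int => decide (a.2 < x.2) && decide (x.1 = b0))
            ∘ fun c => (c, F.getD c 0))
            = fun c => decide (a.2 < F.getD c 0) && decide (c = b0) := rfl
        rw [this, countP_nodup_unique F.keys nd (fun c => decide (a.2 < F.getD c 0)) b0]
        simp [hc, hmem]
      · rw [List.countP_eq_zero.mpr (fun x hx => by simp [Prod.ext_iff, hc])]
        simp [hc]
    rw [show (fun a : String × Int =>
        ((F.items.countP (fun x => decide (a.2 < x.2) && decide ((a.1, x.1) = (a0, b0)))) : Int))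
      = (fun a : String × Int =>
          if a.1 = a0 then (if b0 ∈ v ∧ a.2 < F.getD b0 0 then (1 : Int) else 0) else 0)
      from funext fun a => hE a]
    rw [hitems, List.map_map]
    have : ((fun a : String × Int =>
          if a.1 = a0 then (if b0 ∈ v ∧ a.2 < F.getD b0 0 then (1 : Int) else 0) else 0)
        ∘ fun c => (c, F.getD c 0))
        = fun c => if c = a0 then (if b0 ∈ v ∧ F.getD c 0 < F.getD b0 0 then (1 : Int) else 0) else 0 := rfl
    rw [this, sum_map_ite_unique F.keys a0 _ nd]
    by_cases ha : a0 ∈ v <;> by_cases hb : b0 ∈ v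
    · have hga : F.getD a0 0 = (((PySem.List.index? v a0).getD 0 : Nat) : Int) := firstD_getD v a0 ha
      have hgb : F.getD b0 0 = (((PySem.List.index? v b0).getD 0 : Nat) : Int) := firstD_getD v b0 hb
      simp [winP, ha, hb, hmem, hga, hgb, Nat.cast_lt]
    · simp [winP, ha, hb, hmem]
    · simp [winP, ha, hb, hmem]
    · simp [winP, ha, hb, hmem]

lemma BM_fold (a b : String) (prefs : List (List String)) :
    ∀ (d1 d2 : PySem.Dict (String × String) Int),
    (prefs.foldl (fun bw v => pairLoop (firstD v 0 PySem.Dict.empty).items bw) (d1, d2)).1.getD (a, b) 0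
        = d1.getD (a, b) 0 + (prefs.countP (fun v => decide (a ∈ v ∧ b ∈ v)) : Int)
    ∧ (prefs.foldl (fun bw v => pairLoop (firstD v 0 PySem.Dict.empty).items bw) (d1, d2)).2.getD (a, b) 0
        = d2.getD (a, b) 0 + (prefs.countP (winP a b) : Int) := by
  induction prefs with
  | nil => intro d1 d2; simp
  | cons v t ih =>
    intro d1 d2
    rw [List.foldl_cons]
    obtain ⟨hb1, hb2⟩ := ballot_getD v a b d1 d2
    obtain ⟨ih1, ih2⟩ := ih (pairLoop (firstD v 0 PySem.Dict.empty).items (d1, d2)).1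
      (pairLoop (firstD v 0 PySem.Dict.empty).items (d1, d2)).2
    rw [Prod.mk.eta] at ih1 ih2
    constructor
    · rw [ih1, hb1, List.countP_cons]
      by_cases h : a ∈ v ∧ b ∈ v <;> simp [h]; ring
    · rw [ih2, hb2, List.countP_cons]
      by_cases h : winP a b v = true <;> simp [h]; ring

lemma buildMatrices_getD (a b : String) (prefs : List (List String)) :
    (buildMatrices prefs).1.getD (a, b) 0 = (prefs.countP (fun v => decide (a ∈ v ∧ b ∈ v)) : Int)
    ∧ (buildMatrices prefs).2.getD (a, b) 0 = (prefs.countP (winP a b) : Int) := by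
  have hbm : buildMatrices prefs
      = prefs.foldl (fun bw v => pairLoop (firstD v 0 PySem.Dict.empty).items bw)
        (PySem.Dict.empty, PySem.Dict.empty) := rfl
  obtain ⟨h1, h2⟩ := BM_fold a b prefs PySem.Dict.empty PySem.Dict.empty
  rw [hbm, h1, h2]
  simp

lemma sign_eq_compare (prefs : List (List String)) (a b : String) :
    sign (buildMatrices prefs).1 (buildMatrices prefs).2 a b = compareCandidates a b prefs := by
  obtain ⟨h1, h2⟩ := buildMatrices_getD a b prefs
  have hsplit := countP_both_split a b prefs
  unfold sign compareCandidates
  rw [compare_fold a b prefs (0, 0), h1, h2]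
  have hl : (prefs.countP (fun v => decide (a ∈ v ∧ b ∈ v)) : Int) - (prefs.countP (winP a b) : Int)
      = (prefs.countP (loseP a b) : Int) := by rw [hsplit]; push_cast; ring
  simp only [hl, zero_add]

-- ===== VERDICT (by name: the statement is the Claim_ definition above) =====
theorem copeland_spec : Claim_equal_copeland := by
  intro prefs _
  unfold Spec_copeland copeland copeland_alt
  simp only [sign_eq_compare prefs, PySem.List.foldl_append_singleton_eq_map, List.nil_append]
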